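-- pv_equiv track=rewrite | github.com/solanovisitor/hacs-ai | packages/hacs-tools/src/hacs_tools/domains/development_tools.py | _count_clinical_fields
-- ===== SOURCE A (Python) =====
-- from typing import Any, Dict, List
--
-- def _count_clinical_fields(fields: List[str], resource_type: str) -> int:
--     """Count fields that have clinical significance."""
--     clinical_patterns = [
--         "diagnosis", "condition", "symptom", "vital", "lab", "result",
--         "medication", "allergy", "procedure", "treatment", "clinical",
--         "medical", "health", "care", "therapy", "assessment", "code", "status"
--     ]
--     count = 0
--     for field in fields:
--         if any(pattern in field.lower() for pattern in clinical_patterns):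
--             count += 1
--     return count
-- ===== SOURCE B (Python) =====
-- from typing import List
--
-- _CLINICAL_PATTERNS = (
--     "diagnosis", "condition", "symptom", "vital", "lab", "result",
--     "medication", "allergy", "procedure", "treatment", "clinical",
--     "medical", "health", "care", "therapy", "assessment", "code", "status"
-- )
--
-- _BUCKETS = {}
-- for _p in _CLINICAL_PATTERNS:
--     _BUCKETS.setdefault(_p[0], []).append(_p)
--
-- def _is_clinical(field: str) -> bool:
--     s = field.lower()
--     for i, c in enumerate(s):
--         ps = _BUCKETS.get(c)
--         if ps is not None and any(s.startswith(p, i) for p in ps):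
--             return True
--     return False
--
-- def _count_clinical_fields(fields: List[str], resource_type: str) -> int:
--     return sum(1 for field in fields if _is_clinical(field))
-- ===== Notes on version B (the rewrite author's own statement) =====
-- stated objective: alternative
-- what changed: Replaces the per-field scan of all 18 substrings by a single left-to-right position scan over the lowercased field, using a dict that buckets the patterns by first character so only patterns starting with the current character get a prefix test.
import Mathlib
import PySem

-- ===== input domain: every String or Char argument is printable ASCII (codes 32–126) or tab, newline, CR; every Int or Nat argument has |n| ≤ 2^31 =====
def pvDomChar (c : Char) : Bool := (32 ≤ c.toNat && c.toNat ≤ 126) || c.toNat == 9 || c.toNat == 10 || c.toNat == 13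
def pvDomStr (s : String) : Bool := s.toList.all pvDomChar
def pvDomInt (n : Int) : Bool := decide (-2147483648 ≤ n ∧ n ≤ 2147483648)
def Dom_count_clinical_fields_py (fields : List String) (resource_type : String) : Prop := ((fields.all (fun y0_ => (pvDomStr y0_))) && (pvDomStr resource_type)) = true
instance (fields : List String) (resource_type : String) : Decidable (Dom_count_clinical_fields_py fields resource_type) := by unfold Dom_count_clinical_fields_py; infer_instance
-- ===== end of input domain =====

-- B replaces A's per-field loop over 18 substring searches by one position scan of the
-- lowercased field with the patterns bucketed by first character (alternative, same cost).

-- ===== PORT A =====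
-- A: for each field, test each of the 18 patterns with 'pattern in field.lower()'.
def pvClinicalPatternsA : List String := [
  "diagnosis", "condition", "symptom", "vital", "lab", "result",
  "medication", "allergy", "procedure", "treatment", "clinical",
  "medical", "health", "care", "therapy", "assessment", "code", "status"]

def count_clinical_fields_py (fields : List String) (resource_type : String) : Int :=
  fields.foldl (fun count field =>
    if pvClinicalPatternsA.any (fun pattern => PySem.Str.isIn pattern (PySem.Str.lower field)) then
      count + 1
    else count) 0

-- ===== PORT B =====
-- B: lowercase once, then scan positions left to right; a dict buckets the patterns
-- by first character so only patterns starting with the current character get a prefix test.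
def pvClinicalPatternsB : List (List Char) := [
  "diagnosis".toList, "condition".toList, "symptom".toList, "vital".toList, "lab".toList,
  "result".toList, "medication".toList, "allergy".toList, "procedure".toList,
  "treatment".toList, "clinical".toList, "medical".toList, "health".toList, "care".toList,
  "therapy".toList, "assessment".toList, "code".toList, "status".toList]

-- _BUCKETS: d.setdefault(p[0], []).append(p) = reinsert the extended list at the same key
-- (exact: Dict.insert overwrites in place, appends new keys, like CPython)
def pvBuckets : PySem.Dict Char (List (List Char)) :=
  pvClinicalPatternsB.foldl
    (fun d p => d.insert (p.headD ' ') (d.getD (p.headD ' ') [] ++ [p])) PySem.Dict.empty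

-- the for-i,c loop of _is_clinical: bucket lookup, prefix tests, else next position
def pvScan : List Char → Bool
  | [] => false
  | c :: t =>
      (match pvBuckets.get? c with
       | some ps => ps.any (fun p => p.isPrefixOf (c :: t))
       | none => false) || pvScan t

def pvIsClinical (field : String) : Bool := pvScan (PySem.Chars.lower field.toList)

def count_clinical_fields_py_alt (fields : List String) (resource_type : String) : Int :=
  ((fields.countP (fun field => pvIsClinical field)) : Int)

-- ===== PRECONDITION & SPEC =====
def Spec_count_clinical_fields_py (fields : List String) (resource_type : String) (out : Int) : Prop := out = count_clinical_fields_py_alt fields resource_type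
instance (fields : List String) (resource_type : String) (out : Int) : Decidable (Spec_count_clinical_fields_py fields resource_type out) := by unfold Spec_count_clinical_fields_py; infer_instance

-- ===== CLAIM (what is proved, stated in full; the proofs are below) =====
def Claim_equal_count_clinical_fields_py : Prop := ∀ (fields : List String) (resource_type : String), Dom_count_clinical_fields_py fields resource_type → Spec_count_clinical_fields_py fields resource_type (count_clinical_fields_py fields resource_type)

-- ===== LEMMAS AND PROOFS =====


-- the bucket of c holds exactly the patterns whose first character is c
theorem pv_buckets_getD (c : Char) :
    (pvBuckets.get? c).getD [] = pvClinicalPatternsB.filter (fun p => p.headD ' ' == c) := by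
  by_cases h1 : c = 'd'; · subst h1; decide
  by_cases h2 : c = 'c'; · subst h2; decide
  by_cases h3 : c = 's'; · subst h3; decide
  by_cases h4 : c = 'v'; · subst h4; decide
  by_cases h5 : c = 'l'; · subst h5; decide
  by_cases h6 : c = 'r'; · subst h6; decide
  by_cases h7 : c = 'm'; · subst h7; decide
  by_cases h8 : c = 'a'; · subst h8; decide
  by_cases h9 : c = 'p'; · subst h9; decide
  by_cases h10 : c = 't'; · subst h10; decide
  by_cases h11 : c = 'h'; · subst h11; decide
  have hkeys : pvBuckets.keys = ['d', 'c', 's', 'v', 'l', 'r', 'm', 'a', 'p', 't', 'h'] := by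
    decide
  have hnone : pvBuckets.get? c = none := by
    rw [PySem.Dict.get?_eq_none_iff_not_mem_keys, hkeys]
    simp [h1, h2, h3, h4, h5, h6, h7, h8, h9, h10, h11]
  rw [hnone]
  simp only [Option.getD_none]
  have hheads : pvClinicalPatternsB.map (fun p => p.headD ' ')
      = ['d', 'c', 's', 'v', 'l', 'r', 'm', 'a', 'p', 't', 'c', 'm', 'h', 'c', 't', 'a', 'c', 's'] := by
    decide
  symm
  rw [List.filter_eq_nil_iff]
  intro p hp hbe
  have hh : p.headD ' ' ∈ ['d', 'c', 's', 'v', 'l', 'r', 'm', 'a', 'p', 't', 'c', 'm', 'h', 'c', 't', 'a', 'c', 's'] := by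
    rw [← hheads]; exact List.mem_map_of_mem hp
  simp only [List.mem_cons, List.not_mem_nil, or_false] at hh
  rw [beq_iff_eq] at hbe
  rcases hh with h | h | h | h | h | h | h | h | h | h | h | h | h | h | h | h | h | h <;>
    rw [h] at hbe <;>
      first
        | exact h1 hbe.symm | exact h2 hbe.symm | exact h3 hbe.symm | exact h4 hbe.symm
        | exact h5 hbe.symm | exact h6 hbe.symm | exact h7 hbe.symm | exact h8 hbe.symm
        | exact h9 hbe.symm | exact h10 hbe.symm | exact h11 hbe.symm

-- every pattern is nonempty
theorem pv_patterns_ne_nil : ∀ p ∈ pvClinicalPatternsB, p ≠ [] := by decide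

-- pvScan finds a pattern iff some pattern is an infix
theorem pvScan_iff (s : List Char) :
    pvScan s = true ↔ ∃ p ∈ pvClinicalPatternsB, p <:+: s := by
  induction s with
  | nil =>
      constructor
      · intro h; simp [pvScan] at h
      · rintro ⟨p, hp, h⟩
        exact absurd (List.infix_nil.mp h) (pv_patterns_ne_nil p hp)
  | cons c t ih =>
      have hmatch :
          (match pvBuckets.get? c with
           | some ps => ps.any (fun p => p.isPrefixOf (c :: t))
           | none => false)
            = ((pvBuckets.get? c).getD []).any (fun p => p.isPrefixOf (c :: t)) := by
        cases pvBuckets.get? c <;> simp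
      simp only [pvScan, hmatch, pv_buckets_getD, Bool.or_eq_true, List.any_eq_true,
        List.mem_filter, ih]
      constructor
      · rintro (⟨p, ⟨hp, _⟩, h⟩ | ⟨p, hp, h⟩)
        · exact ⟨p, hp, List.infix_cons_iff.mpr (Or.inl (by simpa using h))⟩
        · exact ⟨p, hp, List.infix_cons_iff.mpr (Or.inr h)⟩
      · rintro ⟨p, hp, h⟩
        rcases List.infix_cons_iff.mp h with h | h
        · refine Or.inl ⟨p, ⟨hp, ?_⟩, by simpa using h⟩
          rcases p with _ | ⟨a, q⟩
          · exact absurd rfl (pv_patterns_ne_nil [] hp)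
          · have := List.cons_prefix_cons.mp h
            simp [this.1]
        · exact Or.inr ⟨p, hp, h⟩

-- per-field conditions agree
theorem pv_cond_eq (field : String) :
    pvClinicalPatternsA.any (fun pattern => PySem.Str.isIn pattern (PySem.Str.lower field)) =
      pvIsClinical field := by
  have hB : pvClinicalPatternsB = pvClinicalPatternsA.map String.toList := rfl
  rcases Bool.eq_false_or_eq_true (pvIsClinical field) with h | h <;> rw [h]
  · rw [pvIsClinical, pvScan_iff] at h
    rcases h with ⟨p, hp, hinf⟩
    rw [hB, List.mem_map] at hp
    rcases hp with ⟨q, hq, rfl⟩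
    rw [List.any_eq_true]
    refine ⟨q, hq, ?_⟩
    simp only [PySem.Str.isIn_eq, PySem.Chars.isIn_iff_infix]
    simpa [PySem.Str.lower] using hinf
  · rw [List.any_eq_false]
    intro p hp
    rw [pvIsClinical] at h
    have hn : ∀ p ∈ pvClinicalPatternsB, ¬ p <:+: PySem.Chars.lower field.toList := by
      intro p hp hc
      rw [← Bool.not_eq_true, pvScan_iff] at h
      exact h ⟨p, hp, hc⟩
    have := hn p.toList (by rw [hB]; exact List.mem_map_of_mem hp)
    simp only [PySem.Str.isIn_eq, Bool.not_eq_true, PySem.Chars.isIn_eq_false_iff]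
    simpa [PySem.Str.lower] using this

-- the counting fold equals countP
theorem pv_fold_count (P : String → Bool) (l : List String) (n : Int) :
    l.foldl (fun count field => if P field then count + 1 else count) n
      = n + (l.countP P : Int) := by
  induction l generalizing n with
  | nil => simp
  | cons x t ih =>
      simp only [List.foldl_cons, List.countP_cons, ih]
      by_cases h : P x = true <;> simp [h] <;> omega

theorem pv_main (fields : List String) (resource_type : String) :
    count_clinical_fields_py fields resource_type
      = count_clinical_fields_py_alt fields resource_type := by
  unfold count_clinical_fields_py count_clinical_fields_py_alt
  rw [pv_fold_count]
  rw [List.countP_congr (fun x _ => by rw [pv_cond_eq])]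
  simp

-- ===== VERDICT (by name: the statement is the Claim_ definition above) =====
theorem count_clinical_fields_py_spec : Claim_equal_count_clinical_fields_py := by
  intro fields resource_type _
  unfold Spec_count_clinical_fields_py
  exact pv_main fields resource_type
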